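-- pv_equiv track=rewrite | github.com/ButchAnton/the_code_book_cipher_challenge | stage04/decrypt_stage04.py | kasiski_analysis
-- ===== SOURCE A (Python) =====
-- import collections
--
-- def kasiski_analysis(ciphertext: str, substr_len: int = 3,
--                      max_kl: int = 30) -> collections.Counter:
--     """
--     Kasiski (1863) test:
--     Repeated substrings of length >= 3 in Vigenere ciphertext tend to be
--     separated by a distance that is a multiple of the key length.  We find all
--     such repeated trigrams, compute pairwise spacings between consecutive
--     occurrences, and accumulate the factors of each spacing (up to max_kl).
--
--     Returns a Counter mapping factor -> vote_count (higher = stronger evidence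
--     for that key length).
--     """
--     positions: dict[str, list[int]] = collections.defaultdict(list)
--     n = len(ciphertext)
--     for i in range(n - substr_len + 1):
--         positions[ciphertext[i:i + substr_len]].append(i)
--
--     factor_counts: collections.Counter = collections.Counter()
--     for pos_list in positions.values():
--         if len(pos_list) < 2:
--             continue
--         for j in range(len(pos_list) - 1):
--             spacing = pos_list[j + 1] - pos_list[j]
--             for f in range(2, min(spacing + 1, max_kl + 1)):
--                 if spacing % f == 0:
--                     factor_counts[f] += 1
--     return factor_counts
-- ===== SOURCE B (Python) =====
-- import collections
--
-- def kasiski_analysis(ciphertext: str, substr_len: int = 3,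
--                      max_kl: int = 30) -> collections.Counter:
--     """
--     Kasiski test: repeated substrings of Vigenere ciphertext tend to be
--     separated by multiples of the key length.  Collect the spacing between
--     consecutive occurrences of every repeated substring and vote for each of
--     its divisors in [2, max_kl].
--     """
--     positions = {}
--     for i in range(len(ciphertext) - substr_len + 1):
--         positions.setdefault(ciphertext[i:i + substr_len], []).append(i)
--
--     votes = collections.Counter()
--     for pos in positions.values():
--         for p, q in zip(pos, pos[1:]):
--             votes.update(_small_divisors(q - p, max_kl))
--     return votes
--
-- def _small_divisors(s, bound):
--     """Divisors of s lying in [2, bound], ascending, by sqrt-paired search."""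
--     lo, hi = [], []
--     d = 1
--     while d * d <= s:
--         if s % d == 0:
--             lo.append(d)
--             if d != s // d:
--                 hi.append(s // d)
--         d += 1
--     return [f for f in lo + hi[::-1] if 2 <= f <= bound]
-- ===== Notes on version B (the rewrite author's own statement) =====
-- stated objective: alternative
-- what changed: B takes spacings from zipped consecutive position pairs and, instead of A's trial division of every factor in 2..min(spacing,max_kl), enumerates each spacing's divisors by sqrt-bounded paired search (collecting d and s//d up to the square root) and votes the ones in [2,max_kl].
import Mathlib
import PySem

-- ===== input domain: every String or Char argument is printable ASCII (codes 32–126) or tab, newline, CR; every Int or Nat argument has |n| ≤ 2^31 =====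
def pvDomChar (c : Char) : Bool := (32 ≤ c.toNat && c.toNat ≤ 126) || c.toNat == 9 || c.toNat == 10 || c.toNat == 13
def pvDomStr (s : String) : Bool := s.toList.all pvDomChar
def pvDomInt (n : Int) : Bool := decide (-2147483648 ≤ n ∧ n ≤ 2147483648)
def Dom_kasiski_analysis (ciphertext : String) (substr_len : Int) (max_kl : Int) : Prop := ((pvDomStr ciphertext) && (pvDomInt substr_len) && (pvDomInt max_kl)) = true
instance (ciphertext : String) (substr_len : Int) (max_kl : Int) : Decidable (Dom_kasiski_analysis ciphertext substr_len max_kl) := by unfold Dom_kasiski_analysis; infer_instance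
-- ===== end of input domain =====

-- B finds each spacing's key-length votes by sqrt-paired divisor enumeration instead of
-- A's trial division over 2..min(spacing, max_kl) (objective: alternative, same Counter).

-- ===== PORT A =====
-- Both Pythons build the identical substring → positions index (A via defaultdict
-- append, B via setdefault append; the folds are the same), so the index is shared.
def pvIndex (ciphertext : String) (substr_len : Int) : PySem.Dict (List Char) (List Int) :=
  (PySem.List.pyRange 0 (PySem.Str.len ciphertext - substr_len + 1) 1).foldl
    (fun d i =>
      d.modify (PySem.Chars.slice ciphertext.toList (some i) (some (i + substr_len))) []
        (fun l => l ++ [i]))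
    PySem.Dict.empty

def kasiski_analysis (ciphertext : String) (substr_len : Int) (max_kl : Int) : List (Int × Int) :=
  let positions := pvIndex ciphertext substr_len
  let factor_counts : PySem.Dict Int Int :=
    positions.values.foldl
      (fun fc pos_list =>
        if PySem.List.len pos_list < 2 then fc
        else
          (PySem.List.pyRange 0 (PySem.List.len pos_list - 1) 1).foldl
            (fun fc j =>
              let spacing := PySem.List.pyGetD pos_list (j + 1) 0 - PySem.List.pyGetD pos_list j 0
              (PySem.List.pyRange 2 (min (spacing + 1) (max_kl + 1)) 1).foldl
                (fun fc f => if PySem.Int.mod spacing f == 0 then fc.modify f 0 (· + 1) else fc)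
                fc)
            fc)
      PySem.Dict.empty
  factor_counts.items

-- ===== PORT B =====
-- the while loop of _small_divisors: d climbs while d*d <= s, collecting d and s//d
def smallDivAux (s : Int) (d : Int) (lo hi : List Int) : List Int × List Int :=
  if d * d ≤ s then
    if PySem.Int.mod s d == 0 then
      smallDivAux s (d + 1) (lo ++ [d])
        (if d == PySem.Int.floordiv s d then hi else hi ++ [PySem.Int.floordiv s d])
    else smallDivAux s (d + 1) lo hi
  else (lo, hi)
termination_by (s + 1 - d).toNat
decreasing_by
  all_goals
    have hd : d ≤ d * d := by
      by_cases h1 : 1 ≤ d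
      · nlinarith
      · nlinarith [mul_self_nonneg d]
    omega

def smallDivisors (s bound : Int) : List Int :=
  let p := smallDivAux s 1 [] []
  (p.1 ++ p.2.reverse).filter (fun f => decide (2 ≤ f) && decide (f ≤ bound))

def kasiski_analysis_alt (ciphertext : String) (substr_len : Int) (max_kl : Int) : List (Int × Int) :=
  let positions := pvIndex ciphertext substr_len
  let votes : PySem.Dict Int Int :=
    positions.values.foldl
      (fun votes pos =>
        (pos.zip pos.tail).foldl
          (fun votes pq =>
            (smallDivisors (pq.2 - pq.1) max_kl).foldl
              (fun votes f => votes.modify f 0 (· + 1)) votes)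
          votes)
      PySem.Dict.empty
  votes.items

-- ===== PRECONDITION & SPEC =====
def Spec_kasiski_analysis (ciphertext : String) (substr_len : Int) (max_kl : Int) (out : List (Int × Int)) : Prop := out = kasiski_analysis_alt ciphertext substr_len max_kl
instance (ciphertext : String) (substr_len : Int) (max_kl : Int) (out : List (Int × Int)) : Decidable (Spec_kasiski_analysis ciphertext substr_len max_kl out) := by unfold Spec_kasiski_analysis; infer_instance

-- ===== CLAIM (what is proved, stated in full; the proofs are below) =====
def Claim_equal_kasiski_analysis : Prop := ∀ (ciphertext : String) (substr_len : Int) (max_kl : Int), Dom_kasiski_analysis ciphertext substr_len max_kl → Spec_kasiski_analysis ciphertext substr_len max_kl (kasiski_analysis ciphertext substr_len max_kl)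

-- ===== LEMMAS AND PROOFS =====

def pvLo (s d : Int) : List Int :=
  (PySem.List.pyRange d (s + 1) 1).filter (fun e => decide (e * e ≤ s) && (PySem.Int.mod s e == 0))

def pvHi (s d : Int) : List Int :=
  ((pvLo s d).filter (fun e => !(e == PySem.Int.floordiv s e))).map (fun e => PySem.Int.floordiv s e)

lemma pv_aux_spec (s : Int) : ∀ (n : Nat) (d : Int) (lo hi : List Int),
    (s + 1 - d).toNat = n → 1 ≤ d →
    smallDivAux s d lo hi = (lo ++ pvLo s d, hi ++ pvHi s d) := by
  intro n
  induction n using Nat.strong_induction_on with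
  | _ n ih =>
    intro d lo hi hn hd1
    rw [smallDivAux]
    by_cases h : d * d ≤ s
    · have hds : d ≤ s := le_trans (by nlinarith) h
      have hcons : PySem.List.pyRange d (s + 1) 1 = d :: PySem.List.pyRange (d + 1) (s + 1) 1 :=
        PySem.List.pyRange_one_cons (by omega)
      have hlo : pvLo s d
          = (if (decide (d * d ≤ s) && (PySem.Int.mod s d == 0)) then [d] else [])
            ++ pvLo s (d + 1) := by
        simp only [pvLo, hcons, List.filter_cons]
        split <;> simp
      have hmeas : (s + 1 - (d + 1)).toNat < n := by omega
      by_cases hm : PySem.Int.mod s d == 0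
      · have hlo' : pvLo s d = d :: pvLo s (d + 1) := by
          rw [hlo]; simp [h, hm]
        have hhi' : pvHi s d
            = (if d == PySem.Int.floordiv s d then [] else [PySem.Int.floordiv s d]) ++ pvHi s (d + 1) := by
          simp only [pvHi, hlo', List.filter_cons]
          by_cases he : d == PySem.Int.floordiv s d
          · simp [he]
          · simp [he]
        rw [if_pos h, if_pos hm, ih _ hmeas (d + 1) _ _ rfl (by omega), hlo', hhi']
        by_cases he : d == PySem.Int.floordiv s d <;> simp [he]
      · have hlo' : pvLo s d = pvLo s (d + 1) := by rw [hlo]; simp [hm]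
        have hhi' : pvHi s d = pvHi s (d + 1) := by simp only [pvHi, hlo']
        rw [if_pos h, if_neg (by simpa using hm), ih _ hmeas (d + 1) _ _ rfl (by omega), hlo', hhi']
    · have hlo : pvLo s d = [] := by
        apply List.filter_eq_nil_iff.mpr
        intro e he
        have hme := PySem.List.mem_pyRange_one.mp he
        have : ¬ e * e ≤ s := by nlinarith
        simp [this]
      have hhi : pvHi s d = [] := by simp [pvHi, hlo]
      rw [if_neg h, hlo, hhi]
      simp

lemma pv_sorted_ext {l₁ l₂ : List Int} (h₁ : l₁.Pairwise (· < ·)) (h₂ : l₂.Pairwise (· < ·))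
    (hm : ∀ x, x ∈ l₁ ↔ x ∈ l₂) : l₁ = l₂ := by
  have nd₁ : l₁.Nodup := h₁.imp (fun h => ne_of_lt h)
  have nd₂ : l₂.Nodup := h₂.imp (fun h => ne_of_lt h)
  exact PySem.List.eq_of_perm_of_pairwise_le_of_injective (fun x => x) (fun a b h => h)
    ((List.perm_ext_iff_of_nodup nd₁ nd₂).mpr hm) (h₁.imp le_of_lt) (h₂.imp le_of_lt)

lemma pv_mem_pvLo (s f : Int) : f ∈ pvLo s 1 ↔ 1 ≤ f ∧ f * f ≤ s ∧ f ∣ s := by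
  simp only [pvLo, List.mem_filter, PySem.List.mem_pyRange_one, Bool.and_eq_true,
    decide_eq_true_eq, beq_iff_eq, PySem.Int.mod_eq_zero_iff_dvd]
  constructor
  · rintro ⟨⟨h1, _⟩, h2, h3⟩; exact ⟨h1, h2, h3⟩
  · rintro ⟨h1, h2, h3⟩; exact ⟨⟨h1, by nlinarith⟩, h2, h3⟩

lemma pv_nil_of_nonpos (s : Int) (hs : s ≤ 0) : pvLo s 1 = [] ∧ pvHi s 1 = [] := by
  have hlo : pvLo s 1 = [] := by
    apply List.eq_nil_iff_forall_not_mem.mpr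
    intro f hf
    obtain ⟨h1, h2, _⟩ := (pv_mem_pvLo s f).mp hf
    nlinarith
  exact ⟨hlo, by simp [pvHi, hlo]⟩

lemma pv_mem_pvHi (s f : Int) (hs : 1 ≤ s) : f ∈ pvHi s 1 ↔ 1 ≤ f ∧ s < f * f ∧ f ∣ s := by
  simp only [pvHi, List.mem_map, List.mem_filter, Bool.not_eq_eq_eq_not, Bool.not_true,
    beq_eq_false_iff_ne, ne_eq]
  constructor
  · rintro ⟨e, ⟨helo, hne⟩, rfl⟩
    obtain ⟨he1, hee, hed⟩ := (pv_mem_pvLo s e).mp helo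
    have he0 : (0:Int) < e := by omega
    rw [PySem.Int.floordiv_eq_ediv_of_pos he0] at hne ⊢
    have hco : e * (s / e) = s := Int.mul_ediv_cancel' hed
    have hf1 : 1 ≤ s / e := by nlinarith
    have hele : e ≤ s / e := by nlinarith
    have helt : e < s / e := lt_of_le_of_ne hele hne
    refine ⟨hf1, by nlinarith, ⟨e, by rw [mul_comm]; exact hco.symm⟩⟩
  · rintro ⟨hf1, hsff, hfd⟩
    have hf0 : (0:Int) < f := by omega
    have hco : f * (s / f) = s := Int.mul_ediv_cancel' hfd
    have he1 : 1 ≤ s / f := by nlinarith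
    have he0 : (0:Int) < s / f := by omega
    have helt : s / f < f := by nlinarith
    have hsd : s = (s / f) * f := by rw [mul_comm] at hco; omega
    have hfl : PySem.Int.floordiv s (s / f) = f := by
      rw [PySem.Int.floordiv_eq_ediv_of_pos he0]
      nth_rewrite 1 [hsd]
      exact Int.mul_ediv_cancel_left _ (by omega)
    refine ⟨s / f, ⟨(pv_mem_pvLo s (s / f)).mpr ⟨he1, by nlinarith, ⟨f, hsd⟩⟩, ?_⟩, hfl⟩
    rw [hfl]; omega

lemma pv_cof_lt (s a b : Int) (hs : 1 ≤ s) (ha : 1 ≤ a) (had : a ∣ s) (hbd : b ∣ s)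
    (hab : a < b) : s / b < s / a := by
  have hca : a * (s / a) = s := Int.mul_ediv_cancel' had
  have hcb : b * (s / b) = s := Int.mul_ediv_cancel' hbd
  have hxa : 1 ≤ s / a := by nlinarith
  have hxb : 1 ≤ s / b := by nlinarith
  nlinarith

lemma pv_pairwise (s : Int) : (pvLo s 1 ++ (pvHi s 1).reverse).Pairwise (· < ·) := by
  by_cases hs : 1 ≤ s
  · rw [List.pairwise_append]
    refine ⟨?_, ?_, ?_⟩
    · exact List.Pairwise.filter _ (PySem.List.pairwise_lt_pyRange_one 1 (s + 1))
    · rw [List.pairwise_reverse]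
      unfold pvHi
      rw [List.pairwise_map]
      have hp : (List.filter (fun e => !(e == PySem.Int.floordiv s e)) (pvLo s 1)).Pairwise (· < ·) :=
        List.Pairwise.filter _ (List.Pairwise.filter _ (PySem.List.pairwise_lt_pyRange_one 1 (s + 1)))
      refine List.Pairwise.imp_of_mem ?_ hp
      intro a b hamem hbmem hab
      have ha := (pv_mem_pvLo s a).mp (List.mem_of_mem_filter hamem)
      have hb := (pv_mem_pvLo s b).mp (List.mem_of_mem_filter hbmem)
      rw [PySem.Int.floordiv_eq_ediv_of_pos (by omega : (0:Int) < a),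
        PySem.Int.floordiv_eq_ediv_of_pos (by omega : (0:Int) < b)]
      exact pv_cof_lt s a b hs ha.1 ha.2.2 hb.2.2 hab
    · intro a hamem b hbmem
      obtain ⟨ha1, haa, _⟩ := (pv_mem_pvLo s a).mp hamem
      obtain ⟨hb1, hbb, _⟩ := (pv_mem_pvHi s b hs).mp (List.mem_reverse.mp hbmem)
      nlinarith
  · obtain ⟨h1, h2⟩ := pv_nil_of_nonpos s (by omega)
    simp [h1, h2]

lemma pv_smallDivisors_eq (s mk : Int) :
    smallDivisors s mk
      = (PySem.List.pyRange 2 (min (s + 1) (mk + 1)) 1).filter (fun f => PySem.Int.mod s f == 0) := by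
  unfold smallDivisors
  rw [pv_aux_spec s _ 1 [] [] rfl (le_refl 1)]
  simp only [List.nil_append]
  by_cases hs : 1 ≤ s
  · apply pv_sorted_ext
    · exact List.Pairwise.filter _ (pv_pairwise s)
    · exact List.Pairwise.filter _ (PySem.List.pairwise_lt_pyRange_one 2 _)
    · intro f
      simp only [List.mem_filter, List.mem_append, List.mem_reverse,
        PySem.List.mem_pyRange_one, Bool.and_eq_true, decide_eq_true_eq, beq_iff_eq,
        PySem.Int.mod_eq_zero_iff_dvd, pv_mem_pvLo, pv_mem_pvHi s _ hs, lt_min_iff]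
      constructor
      · rintro ⟨hmem, h2f, hfmk⟩
        have hdvd : f ∣ s := by rcases hmem with h | h <;> exact h.2.2
        have hfs : f ≤ s := Int.le_of_dvd (by omega) hdvd
        exact ⟨⟨h2f, by omega, by omega⟩, hdvd⟩
      · rintro ⟨⟨h2f, hfs, hfmk⟩, hdvd⟩
        by_cases hsq : f * f ≤ s
        · exact ⟨Or.inl ⟨by omega, hsq, hdvd⟩, h2f, by omega⟩
        · exact ⟨Or.inr ⟨by omega, by omega, hdvd⟩, h2f, by omega⟩
  · obtain ⟨h1, h2⟩ := pv_nil_of_nonpos s (by omega)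
    rw [h1, h2, PySem.List.pyRange_one_eq_nil (by omega : min (s + 1) (mk + 1) ≤ 2)]
    simp


lemma pv_zip_short {pl : List Int} (h : pl.length ≤ 1) : pl.zip pl.tail = [] := by
  match pl, h with
  | [], _ => rfl
  | [x], _ => rfl

lemma pv_zip_diffs (pl : List Int) :
    (PySem.List.pyRange 0 (PySem.List.len pl - 1) 1).map
      (fun j => PySem.List.pyGetD pl (j + 1) 0 - PySem.List.pyGetD pl j 0)
    = (pl.zip pl.tail).map (fun pq => pq.2 - pq.1) := by
  apply List.ext_getElem
  · simp only [List.length_map, PySem.List.length_pyRange_one, PySem.List.len_eq,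
      List.length_zip, List.length_tail]
    omega
  · intro k h1 h2
    simp only [List.length_map, PySem.List.length_pyRange_one, PySem.List.len_eq] at h1
    have hklen : k + 1 < pl.length := by omega
    simp only [List.getElem_map]
    rw [PySem.List.getElem_pyRange_one 0 _ k (by
      simp only [PySem.List.length_pyRange_one, PySem.List.len_eq]; omega)]
    rw [List.getElem_zip, List.getElem_tail]
    have e1 : (0 : Int) + (k : Int) + 1 = ((k + 1 : Nat) : Int) := by omega
    have e0 : (0 : Int) + (k : Int) = ((k : Nat) : Int) := by omega
    rw [e1, e0, PySem.List.pyGetD_natCast, PySem.List.pyGetD_natCast,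
      List.getD_eq_getElem pl 0 hklen, List.getD_eq_getElem pl 0 (by omega)]

lemma pv_body (mk : Int) (pl : List Int) (fc : PySem.Dict Int Int) :
    (if PySem.List.len pl < 2 then fc
     else
       (PySem.List.pyRange 0 (PySem.List.len pl - 1) 1).foldl
         (fun fc j =>
           (PySem.List.pyRange 2
               (min (PySem.List.pyGetD pl (j + 1) 0 - PySem.List.pyGetD pl j 0 + 1) (mk + 1)) 1).foldl
             (fun fc f =>
               if PySem.Int.mod (PySem.List.pyGetD pl (j + 1) 0 - PySem.List.pyGetD pl j 0) f == 0
               then fc.modify f 0 (· + 1) else fc)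
             fc)
         fc)
    = (pl.zip pl.tail).foldl
        (fun votes pq =>
          (smallDivisors (pq.2 - pq.1) mk).foldl
            (fun votes f => votes.modify f 0 (· + 1)) votes)
        fc := by
  have hstep : ∀ (s : Int) (acc : PySem.Dict Int Int),
      (PySem.List.pyRange 2 (min (s + 1) (mk + 1)) 1).foldl
        (fun fc f => if PySem.Int.mod s f == 0 then fc.modify f 0 (· + 1) else fc) acc
      = (smallDivisors s mk).foldl (fun v f => v.modify f 0 (· + 1)) acc := by
    intro s acc
    rw [PySem.List.foldl_if_eq_foldl_filter (fun f => PySem.Int.mod s f == 0)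
      (fun (d : PySem.Dict Int Int) (f : Int) => d.modify f 0 (· + 1)), ← pv_smallDivisors_eq]
  by_cases h : PySem.List.len pl < 2
  · rw [if_pos h, pv_zip_short (by simp only [PySem.List.len_eq] at h; omega)]
    simp
  · rw [if_neg h]
    calc (PySem.List.pyRange 0 (PySem.List.len pl - 1) 1).foldl
          (fun fc j =>
            (PySem.List.pyRange 2
                (min (PySem.List.pyGetD pl (j + 1) 0 - PySem.List.pyGetD pl j 0 + 1) (mk + 1)) 1).foldl
              (fun fc f =>
                if PySem.Int.mod (PySem.List.pyGetD pl (j + 1) 0 - PySem.List.pyGetD pl j 0) f == 0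
                then fc.modify f 0 (· + 1) else fc)
              fc)
          fc
        = (PySem.List.pyRange 0 (PySem.List.len pl - 1) 1).foldl
            (fun fc j =>
              (smallDivisors (PySem.List.pyGetD pl (j + 1) 0 - PySem.List.pyGetD pl j 0) mk).foldl
                (fun v f => v.modify f 0 (· + 1)) fc)
            fc :=
          PySem.List.foldl_congr_mem _ _ _ _
            (fun acc j _ => hstep (PySem.List.pyGetD pl (j + 1) 0 - PySem.List.pyGetD pl j 0) acc)
      _ = ((PySem.List.pyRange 0 (PySem.List.len pl - 1) 1).map
            (fun j => PySem.List.pyGetD pl (j + 1) 0 - PySem.List.pyGetD pl j 0)).foldl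
            (fun fc s => (smallDivisors s mk).foldl (fun v f => v.modify f 0 (· + 1)) fc) fc := by
          rw [List.foldl_map]
      _ = ((pl.zip pl.tail).map (fun pq => pq.2 - pq.1)).foldl
            (fun fc s => (smallDivisors s mk).foldl (fun v f => v.modify f 0 (· + 1)) fc) fc := by
          rw [pv_zip_diffs]
      _ = (pl.zip pl.tail).foldl
            (fun votes pq =>
              (smallDivisors (pq.2 - pq.1) mk).foldl
                (fun votes f => votes.modify f 0 (· + 1)) votes)
            fc := by rw [List.foldl_map]

-- ===== VERDICT (by name: the statement is the Claim_ definition above) =====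
theorem kasiski_analysis_spec : Claim_equal_kasiski_analysis := by
  intro ciphertext substr_len max_kl _
  unfold Spec_kasiski_analysis kasiski_analysis kasiski_analysis_alt
  exact congrArg PySem.Dict.items
    (PySem.List.foldl_congr_mem (pvIndex ciphertext substr_len).values _ _ PySem.Dict.empty
      (fun acc pl _ => pv_body max_kl pl acc))
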